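-- pv_equiv track=rewrite | github.com/rbrezeanu/docker_homework | davaserver/server/process_words.py | longest_consecutive_consonants
-- ===== SOURCE A (Python) =====
-- def longest_consecutive_consonants(words: list[str]) -> str:
--     vowels = "aeiouAEIOU"
--     longest_consonant_word = ""
--     longest_consonant_count = 0
--
--     for word in words:
--         current_count = 0
--         longest_in_word = 0
--
--         for letter in word:
--             if letter not in vowels:
--                 current_count += 1
--                 if current_count > longest_in_word:
--                     longest_in_word = current_count
--             else:
--                 current_count = 0
--
--         if longest_in_word > longest_consonant_count:
--             longest_consonant_count = longest_in_word
--             longest_consonant_word = word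
--
--     return f"{longest_consonant_word}: {longest_consonant_count} consecutive consonants"
-- ===== SOURCE B (Python) =====
-- def _max_run(word):
--     vowels = "aeiouAEIOU"
--     longest = 0
--     i, n = 0, len(word)
--     while i < n:
--         j = i
--         while j < n and word[j] not in vowels:
--             j += 1
--         if j - i > longest:
--             longest = j - i
--         i = j + 1
--     return longest
--
--
-- def longest_consecutive_consonants(words):
--     best_word = ""
--     best = 0
--     for word in words:
--         r = _max_run(word)
--         if r > best:
--             best_word, best = word, r
--     return f"{best_word}: {best} consecutive consonants"
-- ===== Notes on version B (the rewrite author's own statement) =====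
-- stated objective: alternative
-- what changed: Per-word count is computed by a two-pointer segment scan that jumps over each maximal consonant run (and skips the following vowel), instead of A's per-character running counter with an in-loop maximum update.
import Mathlib
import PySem

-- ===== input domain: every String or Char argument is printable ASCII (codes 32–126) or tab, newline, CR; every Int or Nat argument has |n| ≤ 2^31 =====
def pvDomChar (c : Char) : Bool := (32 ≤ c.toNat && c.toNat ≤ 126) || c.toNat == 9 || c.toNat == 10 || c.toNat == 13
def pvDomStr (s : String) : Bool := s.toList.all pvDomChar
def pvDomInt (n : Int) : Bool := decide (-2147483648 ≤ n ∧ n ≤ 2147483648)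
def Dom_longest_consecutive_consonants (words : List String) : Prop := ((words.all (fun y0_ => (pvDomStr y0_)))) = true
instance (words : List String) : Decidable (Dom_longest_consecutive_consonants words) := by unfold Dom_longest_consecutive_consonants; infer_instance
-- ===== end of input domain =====

-- B computes each word's count by a two-pointer scan over maximal consonant segments
-- (skipping the separating vowel) instead of A's per-character running counter; same cost, alternative decomposition.


-- ===== PORT A =====
-- shared constant: the Python string "aeiouAEIOU" (membership test 'letter in vowels')
def pvVowels : List Char := "aeiouAEIOU".toList

-- A's inner loop: running counter, reset on vowel, in-loop max update
def pvStepA (p : Nat × Nat) (letter : Char) : Nat × Nat :=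
  if !(pvVowels.contains letter) then
    let cur := p.1 + 1
    (cur, if cur > p.2 then cur else p.2)
  else (0, p.2)

def longest_consecutive_consonants (words : List String) : String :=
  let r := words.foldl
    (fun (st : String × Nat) word =>
      let inner := word.toList.foldl pvStepA (0, 0)
      if inner.2 > st.2 then (word, inner.2) else st)
    ("", 0)
  r.1 ++ ": " ++ PySem.Int.toStr (r.2 : Int) ++ " consecutive consonants"

-- ===== PORT B =====
-- B's two-pointer scan: take the leading consonant segment, record its length, skip the vowel, repeat
def pvMaxRun : List Char → Nat
  | [] => 0
  | c :: cs =>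
    max ((c :: cs).takeWhile (fun x => !(pvVowels.contains x))).length
        (pvMaxRun (((c :: cs).dropWhile (fun x => !(pvVowels.contains x))).tail))
termination_by cs => cs.length
decreasing_by
  have h1 := List.length_dropWhile_le (p := fun x => !(pvVowels.contains x)) (l := c :: cs)
  have h2 := List.length_tail (l := (c :: cs).dropWhile (fun x => !(pvVowels.contains x)))
  simp only [List.length_cons] at *
  omega

def longest_consecutive_consonants_alt (words : List String) : String :=
  let r := words.foldl
    (fun (st : String × Nat) word =>
      let n := pvMaxRun word.toList
      if n > st.2 then (word, n) else st)
    ("", 0)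
  r.1 ++ ": " ++ PySem.Int.toStr (r.2 : Int) ++ " consecutive consonants"

-- ===== PRECONDITION & SPEC =====
def Spec_longest_consecutive_consonants (words : List String) (out : String) : Prop := out = longest_consecutive_consonants_alt words
instance (words : List String) (out : String) : Decidable (Spec_longest_consecutive_consonants words out) := by unfold Spec_longest_consecutive_consonants; infer_instance

-- ===== CLAIM (what is proved, stated in full; the proofs are below) =====
def Claim_equal_longest_consecutive_consonants : Prop := ∀ (words : List String), Dom_longest_consecutive_consonants words → Spec_longest_consecutive_consonants words (longest_consecutive_consonants words)

-- ===== LEMMAS AND PROOFS =====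

theorem pvMaxRun_nil : pvMaxRun [] = 0 := by rw [pvMaxRun]

theorem pvMaxRun_cons (c : Char) (cs : List Char) : pvMaxRun (c :: cs) =
    max ((c :: cs).takeWhile (fun x => !(pvVowels.contains x))).length
        (pvMaxRun (((c :: cs).dropWhile (fun x => !(pvVowels.contains x))).tail)) := by
  rw [pvMaxRun]

-- reference function: longest run, carrying the length 'cur' of the consonant run ending here
def pvG : Nat → List Char → Nat
  | cur, [] => cur
  | cur, c :: cs => if !(pvVowels.contains c) then pvG (cur + 1) cs else max cur (pvG 0 cs)

theorem pvG_ge (cs : List Char) : ∀ cur, cur ≤ pvG cur cs := by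
  induction cs with
  | nil => intro cur; simp [pvG]
  | cons c cs ih =>
    intro cur
    simp only [pvG]
    split
    · exact le_trans (Nat.le_succ cur) (ih (cur + 1))
    · exact le_max_left _ _

theorem foldA_snd (cs : List Char) : ∀ cur best, cur ≤ best →
    (cs.foldl pvStepA (cur, best)).2 = max best (pvG cur cs) := by
  induction cs with
  | nil => intro cur best h; simp [pvG]; omega
  | cons c cs ih =>
    intro cur best h
    cases hv : pvVowels.contains c with
    | false =>
      simp only [List.foldl, pvStepA, pvG, hv, Bool.not_false, if_true]
      have h1 : cur + 1 ≤ if cur + 1 > best then cur + 1 else best := by split <;> omega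
      rw [ih (cur + 1) _ h1]
      have := pvG_ge cs (cur + 1)
      split <;> omega
    | true =>
      simp only [List.foldl, pvStepA, pvG, hv, Bool.not_true, Bool.false_eq_true, if_false]
      rw [ih 0 best (Nat.zero_le _)]
      have := pvG_ge cs 0
      omega

theorem pvG_run (seg : List Char) : ∀ rest cur, (∀ c ∈ seg, (pvVowels.contains c) = false) →
    pvG cur (seg ++ rest) = pvG (cur + seg.length) rest := by
  induction seg with
  | nil => intro rest cur _; simp
  | cons c seg ih =>
    intro rest cur h
    have hc := h c (by simp)
    simp only [List.cons_append, pvG, hc, Bool.not_false, if_true]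
    rw [ih rest (cur + 1) (fun d hd => h d (by simp [hd]))]
    congr 1
    simp [List.length_cons]; omega

theorem pvMaxRun_eq_g (n : ℕ) : ∀ cs : List Char, cs.length ≤ n → pvMaxRun cs = pvG 0 cs := by
  induction n with
  | zero =>
    intro cs h
    have : cs = [] := List.eq_nil_of_length_eq_zero (Nat.le_zero.mp h)
    subst this; simp [pvMaxRun_nil, pvG]
  | succ n ih =>
    intro cs h
    match cs with
    | [] => simp [pvMaxRun_nil, pvG]
    | c :: cs' =>
      rw [pvMaxRun_cons]
      have hsplit := List.takeWhile_append_dropWhile (p := fun x => !(pvVowels.contains x)) (l := c :: cs')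
      set seg := (c :: cs').takeWhile (fun x => !(pvVowels.contains x)) with hseg
      set rest := (c :: cs').dropWhile (fun x => !(pvVowels.contains x)) with hrest
      have hsegall : ∀ d ∈ seg, (pvVowels.contains d) = false := by
        intro d hd
        have := List.mem_takeWhile_imp (l := c :: cs') (p := fun x => !(pvVowels.contains x)) (hseg ▸ hd)
        simpa using this
      have hG : pvG 0 (c :: cs') = pvG seg.length rest := by
        conv_lhs => rw [← hsplit]
        rw [pvG_run seg rest 0 hsegall]
        simp
      rw [hG]
      have hlen : seg.length + rest.length = cs'.length + 1 := by
        have := congrArg List.length hsplit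
        simpa using this
      match hr : rest with
      | [] => simp [pvG, pvMaxRun_nil]
      | v :: rest' =>
        have hv : (pvVowels.contains v) = true := by
          have := List.head?_dropWhile_not (p := fun x => !(pvVowels.contains x)) (l := c :: cs')
          rw [← hrest] at this
          simpa using this
        have hGv : pvG seg.length (v :: rest') = max seg.length (pvG 0 rest') := by
          simp only [pvG, hv, Bool.not_true, Bool.false_eq_true, if_false]
        rw [hGv]
        have hlt : rest'.length ≤ n := by
          simp only [List.length_cons] at hlen h
          omega
        rw [List.tail_cons, ih rest' hlt]

theorem inner_eq (w : String) :
    (w.toList.foldl pvStepA (0, 0)).2 = pvMaxRun w.toList := by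
  rw [foldA_snd _ 0 0 le_rfl, pvMaxRun_eq_g w.toList.length _ le_rfl]
  omega

-- ===== VERDICT (by name: the statement is the Claim_ definition above) =====
theorem longest_consecutive_consonants_spec : Claim_equal_longest_consecutive_consonants := by
  intro words _
  unfold Spec_longest_consecutive_consonants longest_consecutive_consonants longest_consecutive_consonants_alt
  have hfun : (fun (st : String × Nat) word =>
      let inner := word.toList.foldl pvStepA (0, 0)
      if inner.2 > st.2 then (word, inner.2) else st)
    = (fun (st : String × Nat) word =>
      let n := pvMaxRun word.toList
      if n > st.2 then (word, n) else st) := by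
    funext st word
    simp only [inner_eq]
  rw [hfun]
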